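-- pv_equiv track=rewrite | github.com/carlosortet/historia-computacion | _generador_narrativas_html.py | remove_first_quote
-- ===== SOURCE A (Python) =====
-- def remove_first_quote(body):
--     """Elimina el primer blockquote del body (ya está en el subtítulo)."""
--     lines = body.split("\n")
--     out = []
--     skipping = False
--     skipped = False
--     for line in lines:
--         if not skipped and line.startswith("> "):
--             skipping = True
--             continue
--         if skipping and not line.startswith("> "):
--             skipping = False
--             skipped = True
--         out.append(line)
--     return "\n".join(out)
-- ===== SOURCE B (Python) =====
-- def remove_first_quote(body):
--     """Elimina el primer blockquote del body (ya esta en el subtitulo)."""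
--     lines = body.split("\n")
--     n = len(lines)
--     i = 0
--     while i < n and not lines[i].startswith("> "):
--         i += 1
--     j = i
--     while j < n and lines[j].startswith("> "):
--         j += 1
--     return "\n".join(lines[:i] + lines[j:])
-- ===== Notes on version B (the rewrite author's own statement) =====
-- stated objective: simpler
-- what changed: Replaces the two-flag (skipping/skipped) streaming accumulator pass with explicit boundary detection: find the start i and end j of the first '> ' run, then return the join of lines[:i] + lines[j:].
import Mathlib
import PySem

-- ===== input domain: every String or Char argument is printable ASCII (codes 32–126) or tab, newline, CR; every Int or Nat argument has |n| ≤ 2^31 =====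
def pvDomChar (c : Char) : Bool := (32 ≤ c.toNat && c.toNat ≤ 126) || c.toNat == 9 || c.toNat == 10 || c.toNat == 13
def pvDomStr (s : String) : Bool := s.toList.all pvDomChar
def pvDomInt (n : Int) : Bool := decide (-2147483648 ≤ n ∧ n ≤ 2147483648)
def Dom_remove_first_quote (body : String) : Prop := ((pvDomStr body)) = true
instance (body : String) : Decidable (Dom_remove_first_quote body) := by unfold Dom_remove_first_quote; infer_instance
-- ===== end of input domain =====

-- B removes the first '> ' blockquote by locating its boundaries i..j and joining the slices
-- lines[:i] + lines[j:], instead of A's streaming pass with skipping/skipped flags (objective: simpler).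

-- ===== PORT A =====
-- A-side helper: the loop body (append to out / set skipping / set skipped), state (out, skipping, skipped)
def rfqStep (st : List String × Bool × Bool) (line : String) : List String × Bool × Bool :=
  if !st.2.2 && PySem.Str.startswith line "> " then (st.1, true, st.2.2)
  else if st.2.1 && !PySem.Str.startswith line "> " then (st.1 ++ [line], false, true)
  else (st.1 ++ [line], st.2.1, st.2.2)

def remove_first_quote (body : String) : String :=
  let lines := (PySem.Str.split? body "\n").getD []
  let r := lines.foldl rfqStep ([], false, false)
  PySem.Str.join "\n" r.1

-- ===== PORT B =====
-- the two while loops locating i and j are List.takeWhile / List.dropWhile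
def remove_first_quote_alt (body : String) : String :=
  let lines := (PySem.Str.split? body "\n").getD []
  let pre := lines.takeWhile (fun l => !PySem.Str.startswith l "> ")
  let rest := (lines.dropWhile (fun l => !PySem.Str.startswith l "> ")).dropWhile
      (fun l => PySem.Str.startswith l "> ")
  PySem.Str.join "\n" (pre ++ rest)

-- ===== PRECONDITION & SPEC =====
def Spec_remove_first_quote (body : String) (out : String) : Prop := out = remove_first_quote_alt body
instance (body : String) (out : String) : Decidable (Spec_remove_first_quote body out) := by unfold Spec_remove_first_quote; infer_instance

-- ===== CLAIM (what is proved, stated in full; the proofs are below) =====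
def Claim_equal_remove_first_quote : Prop := ∀ (body : String), Dom_remove_first_quote body → Spec_remove_first_quote body (remove_first_quote body)

-- ===== LEMMAS AND PROOFS =====

-- once skipped = true, the loop just copies every line
theorem rfq_foldl_done (ls : List String) (out : List String) :
    ls.foldl rfqStep (out, false, true) = (out ++ ls, false, true) := by
  induction ls generalizing out with
  | nil => simp
  | cons l ls ih => simp [rfqStep, ih]

-- while skipping, the loop drops the '> ' lines, then copies the rest
theorem rfq_foldl_skipping (ls : List String) (out : List String) :
    (ls.foldl rfqStep (out, true, false)).1
      = out ++ ls.dropWhile (fun l => PySem.Str.startswith l "> ") := by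
  induction ls generalizing out with
  | nil => simp
  | cons l ls ih =>
    by_cases hp : PySem.Chars.startswith l.toList ['>', ' '] = true
    · simpa [rfqStep, hp] using ih out
    · simp [rfqStep, hp, rfq_foldl_done]

-- from the initial state the output is prefix-before-the-block ++ suffix-after-the-block
theorem rfq_foldl_init (ls : List String) (out : List String) :
    (ls.foldl rfqStep (out, false, false)).1
      = out ++ ls.takeWhile (fun l => !PySem.Str.startswith l "> ")
            ++ (ls.dropWhile (fun l => !PySem.Str.startswith l "> ")).dropWhile
                 (fun l => PySem.Str.startswith l "> ") := by
  induction ls generalizing out with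
  | nil => simp
  | cons l ls ih =>
    by_cases hp : PySem.Chars.startswith l.toList ['>', ' '] = true
    · simp [rfqStep, hp, rfq_foldl_skipping]
    · simp [rfqStep, hp, ih]

-- ===== VERDICT (by name: the statement is the Claim_ definition above) =====
theorem remove_first_quote_spec : Claim_equal_remove_first_quote := by
  intro body _
  unfold Spec_remove_first_quote remove_first_quote remove_first_quote_alt
  simp [rfq_foldl_init]
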